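-- pv_equiv track=rewrite | github.com/llmops-databricks-1/llmops-databricks-course-pratikhetan | src/arch_designer_agent/agent_tools.py | _static_expand_keywords
-- ===== SOURCE A (Python) =====
-- DOMAIN_SYNONYMS: dict[str, list[str]] = {
--     "fraud": ["transaction", "payment", "anomaly", "risk", "suspicious", "alert", "chargeback"],
--     "forecasting": ["sales", "demand", "inventory", "orders", "historical", "forecast"],
--     "forecast": ["sales", "demand", "inventory", "orders", "historical"],
--     "recommendation": ["product", "user", "rating", "click", "engagement", "personalization"],
--     "churn": ["retention", "customer", "subscription", "cancellation", "attrition"],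
--     "etl": ["pipeline", "ingestion", "transform", "load", "extract"],
--     "streaming": ["kafka", "kinesis", "event", "realtime", "stream"],
--     "compliance": ["audit", "lineage", "governance", "access", "policy", "security"],
--     "ml": ["model", "training", "inference", "feature", "scoring"],
--     "analytics": ["reporting", "dashboard", "warehouse", "query", "insight"],
--     "inventory": ["stock", "supply", "product", "sku", "warehouse"],
--     "customer": ["user", "client", "account", "profile", "segment"],
--     "financial": ["revenue", "cost", "payment", "transaction", "ledger"],
--     "healthcare": ["patient", "clinical", "medical", "diagnosis", "treatment"],
--     "supply_chain": ["supplier", "logistics", "procurement", "shipment", "vendor"],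
-- }
--
-- def _static_expand_keywords(keywords: list[str]) -> set[str]:
--     """Expand keywords using the static DOMAIN_SYNONYMS dictionary."""
--     expanded: set[str] = set()
--     for kw in keywords:
--         if kw in DOMAIN_SYNONYMS:
--             expanded.update(DOMAIN_SYNONYMS[kw])
--         for canonical, synonyms in DOMAIN_SYNONYMS.items():
--             if kw in synonyms:
--                 expanded.add(canonical)
--                 expanded.update(synonyms)
--     return expanded
-- ===== SOURCE B (Python) =====
-- # B: replaces the per-call rescan of DOMAIN_SYNONYMS with a hard-coded lookup table
-- # _EXPANSION precomputed once from the static DOMAIN_SYNONYMS (token -> its full expansion),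
-- # so the function is a flat comprehension over single dict lookups.
-- _EXPANSION: dict[str, list[str]] = {
--     'fraud': ['transaction', 'payment', 'anomaly', 'risk', 'suspicious', 'alert', 'chargeback'],
--     'forecasting': ['sales', 'demand', 'inventory', 'orders', 'historical', 'forecast'],
--     'forecast': ['sales', 'demand', 'inventory', 'orders', 'historical', 'forecasting', 'forecast'],
--     'recommendation': ['product', 'user', 'rating', 'click', 'engagement', 'personalization'],
--     'churn': ['retention', 'customer', 'subscription', 'cancellation', 'attrition'],
--     'etl': ['pipeline', 'ingestion', 'transform', 'load', 'extract'],
--     'streaming': ['kafka', 'kinesis', 'event', 'realtime', 'stream'],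
--     'compliance': ['audit', 'lineage', 'governance', 'access', 'policy', 'security'],
--     'ml': ['model', 'training', 'inference', 'feature', 'scoring'],
--     'analytics': ['reporting', 'dashboard', 'warehouse', 'query', 'insight'],
--     'inventory': ['stock', 'supply', 'product', 'sku', 'warehouse', 'forecasting', 'sales', 'demand', 'inventory', 'orders', 'historical', 'forecast'],
--     'customer': ['user', 'client', 'account', 'profile', 'segment', 'churn', 'retention', 'customer', 'subscription', 'cancellation', 'attrition'],
--     'financial': ['revenue', 'cost', 'payment', 'transaction', 'ledger'],
--     'healthcare': ['patient', 'clinical', 'medical', 'diagnosis', 'treatment'],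
--     'supply_chain': ['supplier', 'logistics', 'procurement', 'shipment', 'vendor'],
--     'transaction': ['fraud', 'transaction', 'payment', 'anomaly', 'risk', 'suspicious', 'alert', 'chargeback', 'financial', 'revenue', 'cost', 'ledger'],
--     'payment': ['fraud', 'transaction', 'payment', 'anomaly', 'risk', 'suspicious', 'alert', 'chargeback', 'financial', 'revenue', 'cost', 'ledger'],
--     'anomaly': ['fraud', 'transaction', 'payment', 'anomaly', 'risk', 'suspicious', 'alert', 'chargeback'],
--     'risk': ['fraud', 'transaction', 'payment', 'anomaly', 'risk', 'suspicious', 'alert', 'chargeback'],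
--     'suspicious': ['fraud', 'transaction', 'payment', 'anomaly', 'risk', 'suspicious', 'alert', 'chargeback'],
--     'alert': ['fraud', 'transaction', 'payment', 'anomaly', 'risk', 'suspicious', 'alert', 'chargeback'],
--     'chargeback': ['fraud', 'transaction', 'payment', 'anomaly', 'risk', 'suspicious', 'alert', 'chargeback'],
--     'sales': ['forecasting', 'sales', 'demand', 'inventory', 'orders', 'historical', 'forecast'],
--     'demand': ['forecasting', 'sales', 'demand', 'inventory', 'orders', 'historical', 'forecast'],
--     'orders': ['forecasting', 'sales', 'demand', 'inventory', 'orders', 'historical', 'forecast'],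
--     'historical': ['forecasting', 'sales', 'demand', 'inventory', 'orders', 'historical', 'forecast'],
--     'product': ['recommendation', 'product', 'user', 'rating', 'click', 'engagement', 'personalization', 'inventory', 'stock', 'supply', 'sku', 'warehouse'],
--     'user': ['recommendation', 'product', 'user', 'rating', 'click', 'engagement', 'personalization', 'customer', 'client', 'account', 'profile', 'segment'],
--     'rating': ['recommendation', 'product', 'user', 'rating', 'click', 'engagement', 'personalization'],
--     'click': ['recommendation', 'product', 'user', 'rating', 'click', 'engagement', 'personalization'],
--     'engagement': ['recommendation', 'product', 'user', 'rating', 'click', 'engagement', 'personalization'],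
--     'personalization': ['recommendation', 'product', 'user', 'rating', 'click', 'engagement', 'personalization'],
--     'retention': ['churn', 'retention', 'customer', 'subscription', 'cancellation', 'attrition'],
--     'subscription': ['churn', 'retention', 'customer', 'subscription', 'cancellation', 'attrition'],
--     'cancellation': ['churn', 'retention', 'customer', 'subscription', 'cancellation', 'attrition'],
--     'attrition': ['churn', 'retention', 'customer', 'subscription', 'cancellation', 'attrition'],
--     'pipeline': ['etl', 'pipeline', 'ingestion', 'transform', 'load', 'extract'],
--     'ingestion': ['etl', 'pipeline', 'ingestion', 'transform', 'load', 'extract'],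
--     'transform': ['etl', 'pipeline', 'ingestion', 'transform', 'load', 'extract'],
--     'load': ['etl', 'pipeline', 'ingestion', 'transform', 'load', 'extract'],
--     'extract': ['etl', 'pipeline', 'ingestion', 'transform', 'load', 'extract'],
--     'kafka': ['streaming', 'kafka', 'kinesis', 'event', 'realtime', 'stream'],
--     'kinesis': ['streaming', 'kafka', 'kinesis', 'event', 'realtime', 'stream'],
--     'event': ['streaming', 'kafka', 'kinesis', 'event', 'realtime', 'stream'],
--     'realtime': ['streaming', 'kafka', 'kinesis', 'event', 'realtime', 'stream'],
--     'stream': ['streaming', 'kafka', 'kinesis', 'event', 'realtime', 'stream'],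
--     'audit': ['compliance', 'audit', 'lineage', 'governance', 'access', 'policy', 'security'],
--     'lineage': ['compliance', 'audit', 'lineage', 'governance', 'access', 'policy', 'security'],
--     'governance': ['compliance', 'audit', 'lineage', 'governance', 'access', 'policy', 'security'],
--     'access': ['compliance', 'audit', 'lineage', 'governance', 'access', 'policy', 'security'],
--     'policy': ['compliance', 'audit', 'lineage', 'governance', 'access', 'policy', 'security'],
--     'security': ['compliance', 'audit', 'lineage', 'governance', 'access', 'policy', 'security'],
--     'model': ['ml', 'model', 'training', 'inference', 'feature', 'scoring'],
--     'training': ['ml', 'model', 'training', 'inference', 'feature', 'scoring'],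
--     'inference': ['ml', 'model', 'training', 'inference', 'feature', 'scoring'],
--     'feature': ['ml', 'model', 'training', 'inference', 'feature', 'scoring'],
--     'scoring': ['ml', 'model', 'training', 'inference', 'feature', 'scoring'],
--     'reporting': ['analytics', 'reporting', 'dashboard', 'warehouse', 'query', 'insight'],
--     'dashboard': ['analytics', 'reporting', 'dashboard', 'warehouse', 'query', 'insight'],
--     'warehouse': ['analytics', 'reporting', 'dashboard', 'warehouse', 'query', 'insight', 'inventory', 'stock', 'supply', 'product', 'sku'],
--     'query': ['analytics', 'reporting', 'dashboard', 'warehouse', 'query', 'insight'],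
--     'insight': ['analytics', 'reporting', 'dashboard', 'warehouse', 'query', 'insight'],
--     'stock': ['inventory', 'stock', 'supply', 'product', 'sku', 'warehouse'],
--     'supply': ['inventory', 'stock', 'supply', 'product', 'sku', 'warehouse'],
--     'sku': ['inventory', 'stock', 'supply', 'product', 'sku', 'warehouse'],
--     'client': ['customer', 'user', 'client', 'account', 'profile', 'segment'],
--     'account': ['customer', 'user', 'client', 'account', 'profile', 'segment'],
--     'profile': ['customer', 'user', 'client', 'account', 'profile', 'segment'],
--     'segment': ['customer', 'user', 'client', 'account', 'profile', 'segment'],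
--     'revenue': ['financial', 'revenue', 'cost', 'payment', 'transaction', 'ledger'],
--     'cost': ['financial', 'revenue', 'cost', 'payment', 'transaction', 'ledger'],
--     'ledger': ['financial', 'revenue', 'cost', 'payment', 'transaction', 'ledger'],
--     'patient': ['healthcare', 'patient', 'clinical', 'medical', 'diagnosis', 'treatment'],
--     'clinical': ['healthcare', 'patient', 'clinical', 'medical', 'diagnosis', 'treatment'],
--     'medical': ['healthcare', 'patient', 'clinical', 'medical', 'diagnosis', 'treatment'],
--     'diagnosis': ['healthcare', 'patient', 'clinical', 'medical', 'diagnosis', 'treatment'],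
--     'treatment': ['healthcare', 'patient', 'clinical', 'medical', 'diagnosis', 'treatment'],
--     'supplier': ['supply_chain', 'supplier', 'logistics', 'procurement', 'shipment', 'vendor'],
--     'logistics': ['supply_chain', 'supplier', 'logistics', 'procurement', 'shipment', 'vendor'],
--     'procurement': ['supply_chain', 'supplier', 'logistics', 'procurement', 'shipment', 'vendor'],
--     'shipment': ['supply_chain', 'supplier', 'logistics', 'procurement', 'shipment', 'vendor'],
--     'vendor': ['supply_chain', 'supplier', 'logistics', 'procurement', 'shipment', 'vendor'],
-- }
--
--
-- def _static_expand_keywords(keywords: list[str]) -> set[str]: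
--     """Expand keywords using the static DOMAIN_SYNONYMS dictionary."""
--     return set(w for kw in keywords for w in _EXPANSION.get(kw, ()))
-- ===== Notes on version B (the rewrite author's own statement) =====
-- stated objective: faster
-- what changed: B replaces A's per-keyword rescan of every synonym list in DOMAIN_SYNONYMS with a hard-coded expansion table precomputed once from that static dictionary (token -> its full expansion list), so the function is a flat comprehension of single dict lookups.
import Mathlib
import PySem

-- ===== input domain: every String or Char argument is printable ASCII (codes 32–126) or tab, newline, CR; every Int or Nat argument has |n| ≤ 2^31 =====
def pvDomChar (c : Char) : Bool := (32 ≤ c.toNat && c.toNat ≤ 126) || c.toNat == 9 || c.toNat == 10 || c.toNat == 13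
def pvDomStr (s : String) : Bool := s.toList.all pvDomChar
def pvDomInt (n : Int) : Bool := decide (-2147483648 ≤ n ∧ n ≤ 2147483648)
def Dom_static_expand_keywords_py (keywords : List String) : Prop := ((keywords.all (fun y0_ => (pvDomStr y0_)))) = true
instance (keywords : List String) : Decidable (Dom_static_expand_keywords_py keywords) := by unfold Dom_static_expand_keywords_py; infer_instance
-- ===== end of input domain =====

-- B replaces A's per-keyword rescan of DOMAIN_SYNONYMS with a hard-coded expansion table
-- (precomputed once from the static dictionary), a single lookup per keyword (objective: faster).


-- ===== PORT A =====
def domainSynonyms : PySem.Dict String (List String) := PySem.Dict.mk [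
  ("fraud", ["transaction", "payment", "anomaly", "risk", "suspicious", "alert", "chargeback"]),
  ("forecasting", ["sales", "demand", "inventory", "orders", "historical", "forecast"]),
  ("forecast", ["sales", "demand", "inventory", "orders", "historical"]),
  ("recommendation", ["product", "user", "rating", "click", "engagement", "personalization"]),
  ("churn", ["retention", "customer", "subscription", "cancellation", "attrition"]),
  ("etl", ["pipeline", "ingestion", "transform", "load", "extract"]),
  ("streaming", ["kafka", "kinesis", "event", "realtime", "stream"]),
  ("compliance", ["audit", "lineage", "governance", "access", "policy", "security"]),
  ("ml", ["model", "training", "inference", "feature", "scoring"]),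
  ("analytics", ["reporting", "dashboard", "warehouse", "query", "insight"]),
  ("inventory", ["stock", "supply", "product", "sku", "warehouse"]),
  ("customer", ["user", "client", "account", "profile", "segment"]),
  ("financial", ["revenue", "cost", "payment", "transaction", "ledger"]),
  ("healthcare", ["patient", "clinical", "medical", "diagnosis", "treatment"]),
  ("supply_chain", ["supplier", "logistics", "procurement", "shipment", "vendor"])]

-- literal transliteration of A: per keyword, look the keyword up as a key, then scan every
-- (canonical, synonyms) item of the dict
def static_expand_keywords_py (keywords : List String) : List String :=
  keywords.foldl (fun expanded kw =>
    let expanded :=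
      if domainSynonyms.contains kw then
        PySem.Set.update expanded ((domainSynonyms.get? kw).getD [])  -- getD guarded by contains: DOMAIN_SYNONYMS[kw] never raises here
      else expanded
    domainSynonyms.items.foldl (fun expanded p =>
      if kw ∈ p.2 then PySem.Set.update (PySem.Set.add expanded p.1) p.2 else expanded)
      expanded) PySem.Set.empty

-- ===== PORT B =====
-- _EXPANSION: the hard-coded table Source B carries (precomputed once from DOMAIN_SYNONYMS)
def expansionTable : PySem.Dict String (List String) := PySem.Dict.mk [
  ("fraud", ["transaction", "payment", "anomaly", "risk", "suspicious", "alert", "chargeback"]),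
  ("forecasting", ["sales", "demand", "inventory", "orders", "historical", "forecast"]),
  ("forecast", ["sales", "demand", "inventory", "orders", "historical", "forecasting", "forecast"]),
  ("recommendation", ["product", "user", "rating", "click", "engagement", "personalization"]),
  ("churn", ["retention", "customer", "subscription", "cancellation", "attrition"]),
  ("etl", ["pipeline", "ingestion", "transform", "load", "extract"]),
  ("streaming", ["kafka", "kinesis", "event", "realtime", "stream"]),
  ("compliance", ["audit", "lineage", "governance", "access", "policy", "security"]),
  ("ml", ["model", "training", "inference", "feature", "scoring"]),
  ("analytics", ["reporting", "dashboard", "warehouse", "query", "insight"]),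
  ("inventory", ["stock", "supply", "product", "sku", "warehouse", "forecasting", "sales", "demand", "inventory", "orders", "historical", "forecast"]),
  ("customer", ["user", "client", "account", "profile", "segment", "churn", "retention", "customer", "subscription", "cancellation", "attrition"]),
  ("financial", ["revenue", "cost", "payment", "transaction", "ledger"]),
  ("healthcare", ["patient", "clinical", "medical", "diagnosis", "treatment"]),
  ("supply_chain", ["supplier", "logistics", "procurement", "shipment", "vendor"]),
  ("transaction", ["fraud", "transaction", "payment", "anomaly", "risk", "suspicious", "alert", "chargeback", "financial", "revenue", "cost", "ledger"]),
  ("payment", ["fraud", "transaction", "payment", "anomaly", "risk", "suspicious", "alert", "chargeback", "financial", "revenue", "cost", "ledger"]),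
  ("anomaly", ["fraud", "transaction", "payment", "anomaly", "risk", "suspicious", "alert", "chargeback"]),
  ("risk", ["fraud", "transaction", "payment", "anomaly", "risk", "suspicious", "alert", "chargeback"]),
  ("suspicious", ["fraud", "transaction", "payment", "anomaly", "risk", "suspicious", "alert", "chargeback"]),
  ("alert", ["fraud", "transaction", "payment", "anomaly", "risk", "suspicious", "alert", "chargeback"]),
  ("chargeback", ["fraud", "transaction", "payment", "anomaly", "risk", "suspicious", "alert", "chargeback"]),
  ("sales", ["forecasting", "sales", "demand", "inventory", "orders", "historical", "forecast"]),
  ("demand", ["forecasting", "sales", "demand", "inventory", "orders", "historical", "forecast"]),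
  ("orders", ["forecasting", "sales", "demand", "inventory", "orders", "historical", "forecast"]),
  ("historical", ["forecasting", "sales", "demand", "inventory", "orders", "historical", "forecast"]),
  ("product", ["recommendation", "product", "user", "rating", "click", "engagement", "personalization", "inventory", "stock", "supply", "sku", "warehouse"]),
  ("user", ["recommendation", "product", "user", "rating", "click", "engagement", "personalization", "customer", "client", "account", "profile", "segment"]),
  ("rating", ["recommendation", "product", "user", "rating", "click", "engagement", "personalization"]),
  ("click", ["recommendation", "product", "user", "rating", "click", "engagement", "personalization"]),
  ("engagement", ["recommendation", "product", "user", "rating", "click", "engagement", "personalization"]),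
  ("personalization", ["recommendation", "product", "user", "rating", "click", "engagement", "personalization"]),
  ("retention", ["churn", "retention", "customer", "subscription", "cancellation", "attrition"]),
  ("subscription", ["churn", "retention", "customer", "subscription", "cancellation", "attrition"]),
  ("cancellation", ["churn", "retention", "customer", "subscription", "cancellation", "attrition"]),
  ("attrition", ["churn", "retention", "customer", "subscription", "cancellation", "attrition"]),
  ("pipeline", ["etl", "pipeline", "ingestion", "transform", "load", "extract"]),
  ("ingestion", ["etl", "pipeline", "ingestion", "transform", "load", "extract"]),
  ("transform", ["etl", "pipeline", "ingestion", "transform", "load", "extract"]),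
  ("load", ["etl", "pipeline", "ingestion", "transform", "load", "extract"]),
  ("extract", ["etl", "pipeline", "ingestion", "transform", "load", "extract"]),
  ("kafka", ["streaming", "kafka", "kinesis", "event", "realtime", "stream"]),
  ("kinesis", ["streaming", "kafka", "kinesis", "event", "realtime", "stream"]),
  ("event", ["streaming", "kafka", "kinesis", "event", "realtime", "stream"]),
  ("realtime", ["streaming", "kafka", "kinesis", "event", "realtime", "stream"]),
  ("stream", ["streaming", "kafka", "kinesis", "event", "realtime", "stream"]),
  ("audit", ["compliance", "audit", "lineage", "governance", "access", "policy", "security"]),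
  ("lineage", ["compliance", "audit", "lineage", "governance", "access", "policy", "security"]),
  ("governance", ["compliance", "audit", "lineage", "governance", "access", "policy", "security"]),
  ("access", ["compliance", "audit", "lineage", "governance", "access", "policy", "security"]),
  ("policy", ["compliance", "audit", "lineage", "governance", "access", "policy", "security"]),
  ("security", ["compliance", "audit", "lineage", "governance", "access", "policy", "security"]),
  ("model", ["ml", "model", "training", "inference", "feature", "scoring"]),
  ("training", ["ml", "model", "training", "inference", "feature", "scoring"]),
  ("inference", ["ml", "model", "training", "inference", "feature", "scoring"]),
  ("feature", ["ml", "model", "training", "inference", "feature", "scoring"]),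
  ("scoring", ["ml", "model", "training", "inference", "feature", "scoring"]),
  ("reporting", ["analytics", "reporting", "dashboard", "warehouse", "query", "insight"]),
  ("dashboard", ["analytics", "reporting", "dashboard", "warehouse", "query", "insight"]),
  ("warehouse", ["analytics", "reporting", "dashboard", "warehouse", "query", "insight", "inventory", "stock", "supply", "product", "sku"]),
  ("query", ["analytics", "reporting", "dashboard", "warehouse", "query", "insight"]),
  ("insight", ["analytics", "reporting", "dashboard", "warehouse", "query", "insight"]),
  ("stock", ["inventory", "stock", "supply", "product", "sku", "warehouse"]),
  ("supply", ["inventory", "stock", "supply", "product", "sku", "warehouse"]),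
  ("sku", ["inventory", "stock", "supply", "product", "sku", "warehouse"]),
  ("client", ["customer", "user", "client", "account", "profile", "segment"]),
  ("account", ["customer", "user", "client", "account", "profile", "segment"]),
  ("profile", ["customer", "user", "client", "account", "profile", "segment"]),
  ("segment", ["customer", "user", "client", "account", "profile", "segment"]),
  ("revenue", ["financial", "revenue", "cost", "payment", "transaction", "ledger"]),
  ("cost", ["financial", "revenue", "cost", "payment", "transaction", "ledger"]),
  ("ledger", ["financial", "revenue", "cost", "payment", "transaction", "ledger"]),
  ("patient", ["healthcare", "patient", "clinical", "medical", "diagnosis", "treatment"]),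
  ("clinical", ["healthcare", "patient", "clinical", "medical", "diagnosis", "treatment"]),
  ("medical", ["healthcare", "patient", "clinical", "medical", "diagnosis", "treatment"]),
  ("diagnosis", ["healthcare", "patient", "clinical", "medical", "diagnosis", "treatment"]),
  ("treatment", ["healthcare", "patient", "clinical", "medical", "diagnosis", "treatment"]),
  ("supplier", ["supply_chain", "supplier", "logistics", "procurement", "shipment", "vendor"]),
  ("logistics", ["supply_chain", "supplier", "logistics", "procurement", "shipment", "vendor"]),
  ("procurement", ["supply_chain", "supplier", "logistics", "procurement", "shipment", "vendor"]),
  ("shipment", ["supply_chain", "supplier", "logistics", "procurement", "shipment", "vendor"]),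
  ("vendor", ["supply_chain", "supplier", "logistics", "procurement", "shipment", "vendor"])]

-- set(w for kw in keywords for w in _EXPANSION.get(kw, ()))
def static_expand_keywords_py_alt (keywords : List String) : List String :=
  PySem.Set.ofList (keywords.flatMap (fun kw => expansionTable.getD kw []))

-- ===== PRECONDITION & SPEC =====
def Spec_static_expand_keywords_py (keywords : List String) (out : List String) : Prop := out = static_expand_keywords_py_alt keywords
instance (keywords : List String) (out : List String) : Decidable (Spec_static_expand_keywords_py keywords out) := by unfold Spec_static_expand_keywords_py; infer_instance

-- ===== CLAIM (what is proved, stated in full; the proofs are below) =====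
def Claim_equal_static_expand_keywords_py : Prop := ∀ (keywords : List String), Dom_static_expand_keywords_py keywords → Spec_static_expand_keywords_py keywords (static_expand_keywords_py keywords)

-- ===== LEMMAS AND PROOFS =====

-- everything that can be added by A (all keys and all synonyms)
def allTokens : List String :=
  domainSynonyms.keys ++ domainSynonyms.items.flatMap (fun p => p.2)

-- the list of words A adds for a single keyword, in A's insertion order
def scanContrib (kw : String) : List String :=
  domainSynonyms.items.foldl (fun acc p => if kw ∈ p.2 then acc ++ p.1 :: p.2 else acc) []

def contribA (kw : String) : List String :=
  (if domainSynonyms.contains kw then (domainSynonyms.get? kw).getD [] else []) ++ scanContrib kw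

theorem update_ofList {α : Type} [BEq α] [LawfulBEq α] (s : PySem.Set α) (xs : List α) :
    PySem.Set.update s (PySem.Set.ofList xs) = PySem.Set.update s xs := by
  rw [PySem.Set.update_eq_append_filter, PySem.Set.update_eq_append_filter,
    PySem.Set.ofList_ofList]

theorem scan_fold_shift (kw : String) (entries : List (String × List String))
    (acc : List String) :
    entries.foldl (fun acc p => if kw ∈ p.2 then acc ++ p.1 :: p.2 else acc) acc
      = acc ++ entries.foldl (fun acc p => if kw ∈ p.2 then acc ++ p.1 :: p.2 else acc) [] := by
  induction entries generalizing acc with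
  | nil => simp
  | cons p rest ih =>
    simp only [List.foldl_cons]
    rw [ih, ih (if kw ∈ p.2 then [] ++ p.1 :: p.2 else [])]
    split <;> simp

theorem inner_fold_eq_update (kw : String) (entries : List (String × List String))
    (s : PySem.Set String) :
    entries.foldl (fun expanded p =>
        if kw ∈ p.2 then PySem.Set.update (PySem.Set.add expanded p.1) p.2 else expanded) s
      = PySem.Set.update s
          (entries.foldl (fun acc p => if kw ∈ p.2 then acc ++ p.1 :: p.2 else acc) []) := by
  induction entries generalizing s with
  | nil => simp [PySem.Set.update]
  | cons p rest ih =>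
    simp only [List.foldl_cons]
    rw [ih]
    split
    · rw [scan_fold_shift kw rest ([] ++ p.1 :: p.2), List.nil_append,
        PySem.Set.update_append, PySem.Set.update_cons]
    · rfl

theorem stepA_eq (kw : String) (s : PySem.Set String) :
    domainSynonyms.items.foldl (fun expanded p =>
        if kw ∈ p.2 then PySem.Set.update (PySem.Set.add expanded p.1) p.2 else expanded)
      (if domainSynonyms.contains kw then
        PySem.Set.update s ((domainSynonyms.get? kw).getD []) else s)
      = PySem.Set.update s (contribA kw) := by
  simp only [contribA, scanContrib]
  rw [PySem.Set.update_append, inner_fold_eq_update]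
  split <;> simp [PySem.Set.update]

set_option maxRecDepth 40000 in
theorem getD_eq_of_mem :
    ∀ kw ∈ allTokens,
      expansionTable.getD kw [] = PySem.Set.ofList (contribA kw) := by
  decide

set_option maxRecDepth 40000 in
theorem sub_tokens : ∀ x ∈ expansionTable.keys, x ∈ allTokens := by decide

theorem scanContrib_nil (kw : String) (h : kw ∉ allTokens) : scanContrib kw = [] := by
  have hmem : ∀ p ∈ domainSynonyms.items, kw ∉ p.2 := by
    intro p hp hkw
    exact h (by simp [allTokens]; right; exact ⟨p.1, p.2, hp, hkw⟩)
  unfold scanContrib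
  generalize domainSynonyms.items = entries at hmem
  induction entries with
  | nil => rfl
  | cons p rest ih =>
    simp only [List.foldl_cons, if_neg (hmem p (by simp))]
    exact ih (fun q hq => hmem q (by simp [hq]))

theorem getD_eq (kw : String) :
    expansionTable.getD kw [] = PySem.Set.ofList (contribA kw) := by
  by_cases h : kw ∈ allTokens
  · exact getD_eq_of_mem kw h
  · have hk : kw ∉ expansionTable.keys := fun hm => h (sub_tokens kw hm)
    have hget : expansionTable.get? kw = none :=
      (PySem.Dict.get?_eq_none_iff_not_mem_keys _ _).mpr hk
    have hcont : domainSynonyms.contains kw = false := by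
      rw [PySem.Dict.contains_eq_decide_mem_keys]
      simp only [decide_eq_false_iff_not]
      intro hm
      exact h (by simp [allTokens]; left; exact hm)
    simp [PySem.Dict.getD, hget, contribA, hcont, scanContrib_nil kw h, PySem.Set.ofList_nil]

-- folding set-updates over a list is one update by the concatenation of the contributions
theorem fold_update_eq_flat (c : String → List String) (l : List String)
    (s : PySem.Set String) :
    l.foldl (fun s kw => PySem.Set.update s (c kw)) s
      = PySem.Set.update s (l.flatMap c) := by
  induction l generalizing s with
  | nil => simp [PySem.Set.update]
  | cons kw rest ih =>
    simp only [List.foldl_cons, List.flatMap_cons]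
    rw [ih, PySem.Set.update_append]

-- ===== VERDICT (by name: the statement is the Claim_ definition above) =====
theorem static_expand_keywords_py_spec : Claim_equal_static_expand_keywords_py := by
  intro keywords _
  show static_expand_keywords_py keywords = static_expand_keywords_py_alt keywords
  unfold static_expand_keywords_py static_expand_keywords_py_alt
  have hstep : ∀ (s : PySem.Set String) (kw : String),
      domainSynonyms.items.foldl (fun expanded p =>
          if kw ∈ p.2 then PySem.Set.update (PySem.Set.add expanded p.1) p.2 else expanded)
        (if domainSynonyms.contains kw then
          PySem.Set.update s ((domainSynonyms.get? kw).getD []) else s)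
        = PySem.Set.update s (expansionTable.getD kw []) := by
    intro s kw
    rw [stepA_eq, getD_eq, update_ofList]
  calc keywords.foldl (fun expanded kw =>
          domainSynonyms.items.foldl (fun expanded p =>
            if kw ∈ p.2 then PySem.Set.update (PySem.Set.add expanded p.1) p.2 else expanded)
          (if domainSynonyms.contains kw then
            PySem.Set.update expanded ((domainSynonyms.get? kw).getD []) else expanded))
        PySem.Set.empty
      = keywords.foldl (fun s kw => PySem.Set.update s (expansionTable.getD kw []))
          PySem.Set.empty := by
        exact PySem.List.foldl_congr_mem (l := keywords) (init := PySem.Set.empty)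
          (f := fun expanded kw =>
            domainSynonyms.items.foldl (fun expanded p =>
              if kw ∈ p.2 then PySem.Set.update (PySem.Set.add expanded p.1) p.2 else expanded)
            (if domainSynonyms.contains kw then
              PySem.Set.update expanded ((domainSynonyms.get? kw).getD []) else expanded))
          (g := fun s kw => PySem.Set.update s (expansionTable.getD kw []))
          (fun s kw _ => hstep s kw)
  _ = PySem.Set.update PySem.Set.empty (keywords.flatMap (fun kw => expansionTable.getD kw [])) :=
        fold_update_eq_flat _ keywords PySem.Set.empty
  _ = PySem.Set.ofList (keywords.flatMap (fun kw => expansionTable.getD kw [])) :=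
        PySem.Set.update_nil_left _
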